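-- pv_equiv track=rewrite | github.com/JasperK04/website | app.py | score_token_against_words
-- ===== SOURCE A (Python) =====
-- def levenshtein(a: str, b: str) -> int:
--     """Compute Levenshtein edit distance between two strings."""
--     if a == b:
--         return 0
--     la, lb = len(a), len(b)
--     if la == 0:
--         return lb
--     if lb == 0:
--         return la
--     prev = list(range(lb + 1))
--     for i, ca in enumerate(a, 1):
--         curr = [i] + [0] * lb
--         for j, cb in enumerate(b, 1):
--             curr[j] = min(
--                 prev[j] + 1,
--                 curr[j - 1] + 1,
--                 prev[j - 1] + (0 if ca == cb else 1),
--             )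
--         prev = curr
--     return prev[lb]
--
-- def score_token_against_words(token: str, words: list[str], weight: int) -> int:
--     """Score a single query token against a list of words from one field."""
--     best = 0
--     for word in words:
--         word = word.lower()
--         if token == word:
--             best = max(best, 10 * weight)
--         elif token in word or word in token:
--             best = max(best, 6 * weight)
--         elif levenshtein(token, word) <= 2:
--             best = max(best, 3 * weight)
--     return best
-- ===== SOURCE B (Python) =====
-- def _close(a: str, b: str, k: int) -> bool:
--     """Is the Levenshtein distance between a and b at most k? Bounded search,
--     peeling matching characters from the back, never building the DP matrix."""
--     if k < 0:
--         return False
--     if not a: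
--         return len(b) <= k
--     if not b:
--         return len(a) <= k
--     if a[-1] == b[-1]:
--         return _close(a[:-1], b[:-1], k)
--     return (_close(a[:-1], b, k - 1)
--             or _close(a, b[:-1], k - 1)
--             or _close(a[:-1], b[:-1], k - 1))
--
-- def score_token_against_words(token: str, words: list[str], weight: int) -> int:
--     """Score a single query token against a list of words from one field."""
--     lowered = [w.lower() for w in words]
--     if any(token == w for w in lowered):
--         tier = 10
--     elif any(token in w or w in token for w in lowered):
--         tier = 6
--     elif any(_close(token, w, 2) for w in lowered):
--         tier = 3
--     else:
--         tier = 0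
--     return max(0, tier * weight)
-- ===== Notes on version B (the rewrite author's own statement) =====
-- stated objective: faster
-- what changed: Replaces the full O(L^2) Levenshtein DP matrix by a bounded recursive distance-at-most-2 check that peels matching characters from the back and branches only on mismatches (O(L) per word), and replaces the single running-max word loop by a short-circuiting tier cascade (one any() scan per tier) returning max(0, tier*weight).
import Mathlib
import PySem

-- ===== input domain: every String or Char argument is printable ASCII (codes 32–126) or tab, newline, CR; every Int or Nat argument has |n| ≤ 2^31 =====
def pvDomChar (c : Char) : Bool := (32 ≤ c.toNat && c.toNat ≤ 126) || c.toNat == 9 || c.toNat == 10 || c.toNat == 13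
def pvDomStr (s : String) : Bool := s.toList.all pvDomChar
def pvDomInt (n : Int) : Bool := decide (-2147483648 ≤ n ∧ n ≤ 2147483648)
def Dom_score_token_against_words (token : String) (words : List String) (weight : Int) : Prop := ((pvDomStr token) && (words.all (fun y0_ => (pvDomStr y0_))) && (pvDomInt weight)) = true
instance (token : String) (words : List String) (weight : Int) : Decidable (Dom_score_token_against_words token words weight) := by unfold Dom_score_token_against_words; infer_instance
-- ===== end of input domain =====

-- B replaces the full Levenshtein DP matrix by a bounded recursive distance-at-most-2 check
-- (peeling matching last characters, branching only on mismatches) and the running-max word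
-- loop by a short-circuiting tier cascade; measured faster in a timing run.


-- ===== PORT A =====
-- inner DP loop of A's levenshtein: 'for j, cb in enumerate(b, 1): curr[j] = min(prev[j]+1,
-- curr[j-1]+1, prev[j-1]+cost)'; the index accesses are streamed: the pairs are (cb, prev[j]),
-- 'diag' is prev[j-1] and 'left' is curr[j-1]; the same values in the same order.
def levInner (ca : Char) : List (Char × Int) → Int → Int → List Int
  | [], _, _ => []
  | (cb, pj) :: rest, diag, left =>
      let cij := min (pj + 1) (min (left + 1) (diag + (if ca == cb then (0 : Int) else 1)))
      cij :: levInner ca rest pj cij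

-- outer loop 'for i, ca in enumerate(a, 1): curr = [i] + …; prev = curr'
def levRows (bl : List Char) : List Char → List Int → Int → List Int
  | [], prev, _ => prev
  | ca :: as_, prev, i =>
      levRows bl as_ (i :: levInner ca (bl.zip prev.tail) (prev.headD 0) i) (i + 1)

def levenshtein (a b : String) : Int :=
  if a == b then 0
  else
    let al := a.toList
    let bl := b.toList
    if al.length = 0 then (bl.length : Int)
    else if bl.length = 0 then (al.length : Int)
    else
      let prev : List Int := (List.range (bl.length + 1)).map (fun (n : Nat) => (n : Int))
      (levRows bl al prev 1).getD bl.length 0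

def score_token_against_words (token : String) (words : List String) (weight : Int) : Int :=
  words.foldl (fun best word0 =>
    let word := PySem.Str.lower word0
    if token == word then max best (10 * weight)
    else if PySem.Str.isIn token word || PySem.Str.isIn word token then max best (6 * weight)
    else if levenshtein token word ≤ 2 then max best (3 * weight)
    else best) 0

-- ===== PORT B =====
-- Source B's _close: bounded 'distance ≤ k' check; a[-1]==b[-1] is compared via getLast?
-- (both lists are nonempty there), a[:-1] is dropLast.
def pvClose (a b : List Char) (k : Int) : Bool :=
  if k < 0 then false
  else if a.isEmpty then decide ((b.length : Int) ≤ k)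
  else if b.isEmpty then decide ((a.length : Int) ≤ k)
  else if a.getLast? == b.getLast? then pvClose a.dropLast b.dropLast k
  else pvClose a.dropLast b (k - 1) || pvClose a b.dropLast (k - 1) || pvClose a.dropLast b.dropLast (k - 1)
termination_by a.length + b.length
decreasing_by all_goals
  simp_all [List.isEmpty_iff, List.length_dropLast]
  cases a <;> cases b <;> simp_all <;> omega

def score_token_against_words_alt (token : String) (words : List String) (weight : Int) : Int :=
  let lowered := words.map PySem.Str.lower
  let tier : Int :=
    if lowered.any (fun w => token == w) then 10
    else if lowered.any (fun w => PySem.Str.isIn token w || PySem.Str.isIn w token) then 6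
    else if lowered.any (fun w => pvClose token.toList w.toList 2) then 3
    else 0
  max 0 (tier * weight)

-- ===== PRECONDITION & SPEC =====
def Spec_score_token_against_words (token : String) (words : List String) (weight : Int) (out : Int) : Prop := out = score_token_against_words_alt token words weight
instance (token : String) (words : List String) (weight : Int) (out : Int) : Decidable (Spec_score_token_against_words token words weight out) := by unfold Spec_score_token_against_words; infer_instance

-- ===== CLAIM (what is proved, stated in full; the proofs are below) =====
def Claim_equal_score_token_against_words : Prop := ∀ (token : String) (words : List String) (weight : Int), Dom_score_token_against_words token words weight → Spec_score_token_against_words token words weight (score_token_against_words token words weight)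

-- ===== LEMMAS AND PROOFS =====

-- reference edit distance (front-peeling recursion), used only by the proofs
def lev : List Char → List Char → Nat
  | [], b => b.length
  | _ :: a, [] => a.length + 1
  | x :: a, y :: b =>
      min (lev a (y :: b) + 1) (min (lev (x :: a) b + 1) (lev a b + (if x = y then 0 else 1)))
termination_by a b => a.length + b.length

theorem lev_nil_right (a : List Char) : lev a [] = a.length := by
  cases a <;> simp [lev]

theorem lev_self (a : List Char) : lev a a = 0 := by
  induction a with
  | nil => simp [lev]
  | cons x a ih => simp [lev, ih]

theorem lev_cons_right_le (a b : List Char) (y : Char) : lev a (y :: b) ≤ lev a b + 1 := by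
  cases a with
  | nil => simp [lev]; try omega
  | cons x a =>
    rw [show lev (x :: a) (y :: b) = min (lev a (y :: b) + 1) (min (lev (x :: a) b + 1) (lev a b + (if x = y then 0 else 1))) from by rw [lev]]
    omega

theorem lev_cons_left_le (a b : List Char) (x : Char) : lev (x :: a) b ≤ lev a b + 1 := by
  cases b with
  | nil => simp [lev, lev_nil_right]; try omega
  | cons y b =>
    rw [show lev (x :: a) (y :: b) = min (lev a (y :: b) + 1) (min (lev (x :: a) b + 1) (lev a b + (if x = y then 0 else 1))) from by rw [lev]]
    omega

theorem le_lev_cons_left (a b : List Char) (x : Char) : lev a b ≤ lev (x :: a) b + 1 := by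
  induction b generalizing a with
  | nil => simp [lev_nil_right]; omega
  | cons y b ih =>
    rw [show lev (x :: a) (y :: b) = min (lev a (y :: b) + 1) (min (lev (x :: a) b + 1) (lev a b + (if x = y then 0 else 1))) from by rw [lev]]
    have h2 := ih a
    have h3 := lev_cons_right_le a b y
    omega

theorem le_lev_cons_right (a b : List Char) (y : Char) : lev a b ≤ lev a (y :: b) + 1 := by
  induction a generalizing b with
  | nil => simp [lev]; omega
  | cons x a ih =>
    rw [show lev (x :: a) (y :: b) = min (lev a (y :: b) + 1) (min (lev (x :: a) b + 1) (lev a b + (if x = y then 0 else 1))) from by rw [lev]]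
    have h2 := ih b
    have h3 := lev_cons_left_le a b x
    omega

theorem lev_cons_cons_self (a b : List Char) (x : Char) : lev (x :: a) (x :: b) = lev a b := by
  rw [show lev (x :: a) (x :: b) = min (lev a (x :: b) + 1) (min (lev (x :: a) b + 1) (lev a b + (if x = x then 0 else 1))) from by rw [lev]]
  rw [if_pos rfl]
  have h1 := le_lev_cons_right a b x
  have h2 := le_lev_cons_left a b x
  omega

-- ===== pvClose computes 'lev of the reversals ≤ k' =====
theorem pvClose_iff (n : Nat) : ∀ (a b : List Char) (k : Int), a.length + b.length ≤ n →
    (pvClose a b k = true ↔ ((lev a.reverse b.reverse : Int) ≤ k)) := by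
  induction n with
  | zero =>
    intro a b k h
    have ha : a = [] := by cases a <;> simp_all
    have hb : b = [] := by cases b <;> simp_all
    subst ha; subst hb
    rw [pvClose]
    simp [lev]
  | succ n ih =>
    intro a b k h
    rw [pvClose]
    by_cases hk : k < 0
    · simp only [if_pos hk]
      have : (0 : Int) ≤ (lev a.reverse b.reverse : Int) := Int.natCast_nonneg _
      constructor
      · intro hc; cases hc
      · intro hc; omega
    · simp only [if_neg hk]
      rcases List.eq_nil_or_concat a with ha | ⟨a', x, rfl⟩
      · subst ha; simp [lev]
      · simp only [List.concat_eq_append]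
        rcases List.eq_nil_or_concat b with hb | ⟨b', y, rfl⟩
        · subst hb
          simp [lev_nil_right]
        · simp only [List.concat_eq_append]
          have hla : (a' ++ [x]).length = a'.length + 1 := by simp
          have hlb : (b' ++ [y]).length = b'.length + 1 := by simp
          simp only [List.isEmpty_iff, List.append_ne_nil_of_right_ne_nil, List.getLast?_concat,
            List.dropLast_concat, if_neg (by simp : ¬(a' ++ [x] = [])), if_neg (by simp : ¬(b' ++ [y] = []))]
          rw [List.reverse_append, List.reverse_append]
          simp only [List.reverse_singleton, List.singleton_append]
          by_cases hxy : x = y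
          · simp only [hxy, beq_iff_eq, Option.some.injEq, if_pos rfl]
            rw [lev_cons_cons_self]
            apply ih
            simp at h ⊢; omega
          · rw [if_neg (by simp [hxy])]
            rw [show lev (x :: a'.reverse) (y :: b'.reverse) = min (lev a'.reverse (y :: b'.reverse) + 1) (min (lev (x :: a'.reverse) b'.reverse + 1) (lev a'.reverse b'.reverse + (if x = y then 0 else 1))) from by rw [lev]]
            have h1 := ih a' (b' ++ [y]) (k - 1) (by simp at h ⊢; omega)
            have h2 := ih (a' ++ [x]) b' (k - 1) (by simp at h ⊢; omega)
            have h3 := ih a' b' (k - 1) (by simp at h ⊢; omega)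
            rw [List.reverse_append] at h1 h2
            simp only [List.reverse_singleton, List.singleton_append] at h1 h2
            simp only [if_neg hxy, Bool.or_eq_true, h1, h2, h3]
            push_cast
            omega

-- ===== A's DP computes lev of the reversals =====
-- tail of the DP row for already-consumed (reversed) prefix rp of a and rb of b
def rowTail (rp rb : List Char) : List Char → List Int
  | [] => []
  | cb :: bs => (lev rp (cb :: rb) : Int) :: rowTail rp (cb :: rb) bs

theorem inner_spec (ca : Char) (rp : List Char) : ∀ (bs rb : List Char),
    levInner ca (bs.zip (rowTail rp rb bs)) (lev rp rb : Int) (lev (ca :: rp) rb : Int)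
      = rowTail (ca :: rp) rb bs := by
  intro bs
  induction bs with
  | nil => intro rb; simp [rowTail, levInner]
  | cons cb bs ihb =>
    intro rb
    rw [show rowTail rp rb (cb :: bs) = (lev rp (cb :: rb) : Int) :: rowTail rp (cb :: rb) bs from rfl]
    rw [show (cb :: bs).zip ((lev rp (cb :: rb) : Int) :: rowTail rp (cb :: rb) bs)
        = (cb, (lev rp (cb :: rb) : Int)) :: bs.zip (rowTail rp (cb :: rb) bs) from rfl]
    rw [levInner]
    have hcij : min ((lev rp (cb :: rb) : Int) + 1) (min ((lev (ca :: rp) rb : Int) + 1) ((lev rp rb : Int) + (if ca == cb then (0 : Int) else 1)))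
        = (lev (ca :: rp) (cb :: rb) : Int) := by
      rw [show lev (ca :: rp) (cb :: rb) = min (lev rp (cb :: rb) + 1) (min (lev (ca :: rp) rb + 1) (lev rp rb + (if ca = cb then 0 else 1))) from by rw [lev]]
      by_cases h : ca = cb <;> simp [h] <;> push_cast <;> omega
    rw [hcij, ihb (cb :: rb)]
    rfl

theorem rows_spec (bl : List Char) : ∀ (as_ rp : List Char),
    levRows bl as_ ((lev rp [] : Int) :: rowTail rp [] bl) ((rp.length : Int) + 1)
      = (lev (as_.reverse ++ rp) [] : Int) :: rowTail (as_.reverse ++ rp) [] bl := by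
  intro as_
  induction as_ with
  | nil => intro rp; simp [levRows]
  | cons ca as_ ih =>
    intro rp
    rw [levRows]
    simp only [List.tail_cons, List.headD_cons]
    have hi : ((rp.length : Int) + 1) = (lev (ca :: rp) [] : Int) := by
      rw [lev_nil_right]; push_cast [List.length_cons]; ring
    rw [hi, inner_spec ca rp bl []]
    rw [show ((lev (ca :: rp) [] : Int) + 1) = (((ca :: rp).length : Int) + 1) from by
      rw [lev_nil_right]]
    rw [ih (ca :: rp)]
    simp

theorem rowTail_nil_left : ∀ (bs rb : List Char),
    rowTail [] rb bs = (List.range bs.length).map (fun j => ((rb.length + j + 1 : Nat) : Int)) := by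
  intro bs
  induction bs with
  | nil => intro rb; simp [rowTail]
  | cons cb bs ih =>
    intro rb
    rw [show rowTail [] rb (cb :: bs) = (lev [] (cb :: rb) : Int) :: rowTail [] (cb :: rb) bs from rfl]
    rw [ih (cb :: rb)]
    rw [show (cb :: bs).length = bs.length + 1 from rfl, List.range_succ_eq_map]
    simp only [List.map_cons, List.map_map, List.cons.injEq]
    refine ⟨by simp [lev], ?_⟩
    apply List.map_congr_left
    intro j _
    simp only [Function.comp, List.length_cons, Nat.succ_eq_add_one]
    congr 1
    omega

theorem getD_rowTail : ∀ (bs rb rp : List Char),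
    ((lev rp rb : Int) :: rowTail rp rb bs).getD bs.length 0 = (lev rp (bs.reverse ++ rb) : Int) := by
  intro bs
  induction bs with
  | nil => intro rb rp; simp
  | cons cb bs ih =>
    intro rb rp
    rw [show rowTail rp rb (cb :: bs) = (lev rp (cb :: rb) : Int) :: rowTail rp (cb :: rb) bs from rfl]
    rw [show (cb :: bs).length = bs.length + 1 from rfl]
    rw [show ((lev rp rb : Int) :: (lev rp (cb :: rb) : Int) :: rowTail rp (cb :: rb) bs).getD (bs.length + 1) 0 = ((lev rp (cb :: rb) : Int) :: rowTail rp (cb :: rb) bs).getD bs.length 0 from rfl]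
    rw [ih (cb :: rb) rp]
    simp

-- A's levenshtein equals lev of the reversed character lists
theorem levenshtein_eq (a b : String) : levenshtein a b = (lev a.toList.reverse b.toList.reverse : Int) := by
  unfold levenshtein
  by_cases hab : a == b
  · have : a = b := eq_of_beq hab
    subst this
    simp [hab, lev_self]
  · rw [if_neg hab]
    by_cases ha : a.toList.length = 0
    · have ha' : a.toList = [] := List.length_eq_zero_iff.mp ha
      simp [ha, ha', lev]
    · simp only [if_neg ha]
      by_cases hb : b.toList.length = 0
      · have hb' : b.toList = [] := List.length_eq_zero_iff.mp hb
        simp [hb, hb', lev_nil_right]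
      · simp only [if_neg hb]
        have hinit : (List.range (b.toList.length + 1)).map (fun (n : Nat) => (n : Int))
            = (lev ([] : List Char) [] : Int) :: rowTail [] [] b.toList := by
          rw [rowTail_nil_left b.toList [], List.range_succ_eq_map, List.map_cons, List.map_map]
          simp only [List.cons.injEq]
          refine ⟨by simp [lev], ?_⟩
          apply List.map_congr_left
          intro j _
          simp only [Function.comp, List.length_nil, Nat.succ_eq_add_one]
          congr 1
          omega
        rw [hinit]
        rw [show (1 : Int) = ((([] : List Char)).length : Int) + 1 from by simp]
        rw [rows_spec b.toList a.toList []]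
        rw [List.append_nil]
        rw [getD_rowTail b.toList [] a.toList.reverse]
        rw [List.append_nil]

-- bridge: B's bounded check decides A's 'levenshtein ≤ 2'
theorem pvClose_eq_decide (a b : String) : pvClose a.toList b.toList 2 = decide (levenshtein a b ≤ 2) := by
  have h := pvClose_iff (a.toList.length + b.toList.length) a.toList b.toList 2 le_rfl
  rw [levenshtein_eq]
  by_cases hc : pvClose a.toList b.toList 2
  · rw [hc]; exact (decide_eq_true (h.mp hc)).symm
  · simp only [hc]
    symm
    simp only [decide_eq_false_iff_not]
    intro hle
    exact (Bool.eq_false_iff.mp (Bool.not_eq_true _ |>.mp hc)) (h.mpr hle)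

-- ===== tier cascade = running max (per-word tiers) =====
def pvT (token w : String) : Int :=
  if token == w then 10
  else if PySem.Str.isIn token w || PySem.Str.isIn w token then 6
  else if levenshtein token w ≤ 2 then 3 else 0

def pvTm (token : String) (ls : List String) : Int :=
  ls.foldr (fun w acc => max (pvT token w) acc) 0

theorem pvT_nonneg (token w : String) : 0 ≤ pvT token w := by
  unfold pvT; split_ifs <;> norm_num

theorem pvTm_nonneg (token : String) (ls : List String) : 0 ≤ pvTm token ls := by
  induction ls with
  | nil => simp [pvTm]
  | cons w ws ih => simp only [pvTm, List.foldr] at *; exact le_trans ih (le_max_right _ _)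

theorem le_pvTm (token : String) {ls : List String} {w : String} (h : w ∈ ls) :
    pvT token w ≤ pvTm token ls := by
  induction ls with
  | nil => cases h
  | cons x xs ih =>
      rcases List.mem_cons.mp h with rfl | h
      · exact le_max_left _ _
      · exact le_trans (ih h) (le_max_right _ _)

theorem pvTm_le (token : String) {ls : List String} {c : Int} (hc : 0 ≤ c)
    (h : ∀ w ∈ ls, pvT token w ≤ c) : pvTm token ls ≤ c := by
  induction ls with
  | nil => simpa [pvTm] using hc
  | cons x xs ih =>
      simp only [pvTm, List.foldr] at *
      exact max_le (h x (List.mem_cons_self)) (ih (fun w hw => h w (List.mem_cons_of_mem _ hw)))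

theorem max0_mul_max (x y c : Int) (hx : 0 ≤ x) (hy : 0 ≤ y) :
    max 0 (max x y * c) = max (max 0 (x * c)) (max 0 (y * c)) := by
  rcases le_total x y with h | h <;> rcases le_total 0 c with hc | hc <;>
    simp [max_def] <;> split_ifs <;> nlinarith

theorem foldA_eq (token : String) (weight : Int) :
    ∀ (ls : List String) (best : Int), 0 ≤ best →
      ls.foldl (fun best w =>
        if token == w then max best (10 * weight)
        else if PySem.Str.isIn token w || PySem.Str.isIn w token then max best (6 * weight)
        else if levenshtein token w ≤ 2 then max best (3 * weight)
        else best) best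
      = max best (max 0 (pvTm token ls * weight)) := by
  intro ls
  induction ls with
  | nil => intro best hb; simp [pvTm]; omega
  | cons w ws ih =>
      intro best hb
      have hstep : (if token == w then max best (10 * weight)
          else if PySem.Str.isIn token w || PySem.Str.isIn w token then max best (6 * weight)
          else if levenshtein token w ≤ 2 then max best (3 * weight)
          else best) = max best (max 0 (pvT token w * weight)) := by
        unfold pvT
        split_ifs <;> (simp only [max_def]; split_ifs <;> omega)
      have hb' : 0 ≤ max best (max 0 (pvT token w * weight)) :=
        le_trans hb (le_max_left _ _)
      simp only [List.foldl, hstep, ih _ hb']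
      have : pvTm token (w :: ws) = max (pvT token w) (pvTm token ws) := rfl
      rw [this, max0_mul_max _ _ _ (pvT_nonneg token w) (pvTm_nonneg token ws), max_assoc]

theorem pvTm_eq_tier (token : String) (ls : List String) :
    pvTm token ls =
      (if ls.any (fun w => token == w) then (10 : Int)
       else if ls.any (fun w => PySem.Str.isIn token w || PySem.Str.isIn w token) then 6
       else if ls.any (fun w => pvClose token.toList w.toList 2) then 3
       else 0) := by
  simp only [pvClose_eq_decide]
  by_cases hE : ls.any (fun w => token == w)
  · simp only [hE, if_true]
    obtain ⟨x, hx, hxe⟩ := List.any_eq_true.mp hE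
    refine le_antisymm (pvTm_le token (by norm_num) (fun w _ => ?_)) ?_
    · unfold pvT; split_ifs <;> norm_num
    · have : pvT token x = 10 := by unfold pvT; simp [hxe]
      exact this ▸ le_pvTm token hx
  · have hEall := List.any_eq_false.mp (Bool.not_eq_true _ |>.mp hE)
    simp only [hE]
    by_cases hS : ls.any (fun w => PySem.Str.isIn token w || PySem.Str.isIn w token)
    · simp only [hS, if_true]
      obtain ⟨x, hx, hxs⟩ := List.any_eq_true.mp hS
      refine le_antisymm (pvTm_le token (by norm_num) (fun w hw => ?_)) ?_
      · unfold pvT; have := hEall w hw; split_ifs <;> simp_all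
      · have : pvT token x = 6 := by
          unfold pvT; have := hEall x hx; simp_all
        exact this ▸ le_pvTm token hx
    · have hSall := List.any_eq_false.mp (Bool.not_eq_true _ |>.mp hS)
      simp only [hS]
      by_cases hL : ls.any (fun w => decide (levenshtein token w ≤ 2))
      · simp only [hL, if_true]
        obtain ⟨x, hx, hxl⟩ := List.any_eq_true.mp hL
        refine le_antisymm (pvTm_le token (by norm_num) (fun w hw => ?_)) ?_
        · unfold pvT
          have h1 := hEall w hw; have h2 := hSall w hw
          split_ifs <;> simp_all
        · have : pvT token x = 3 := by
            unfold pvT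
            have h1 := hEall x hx; have h2 := hSall x hx
            simp_all
          exact this ▸ le_pvTm token hx
      · have hLall := List.any_eq_false.mp (Bool.not_eq_true _ |>.mp hL)
        simp only [hL]
        refine le_antisymm (pvTm_le token le_rfl (fun w hw => ?_)) (pvTm_nonneg token ls)
        unfold pvT
        have h1 := hEall w hw; have h2 := hSall w hw; have h3 := hLall w hw
        split_ifs <;> simp_all

-- ===== VERDICT (by name: the statement is the Claim_ definition above) =====
theorem score_token_against_words_spec : Claim_equal_score_token_against_words := by
  intro token words weight _
  unfold Spec_score_token_against_words score_token_against_words score_token_against_words_alt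
  rw [show (words.foldl (fun best word0 =>
        let word := PySem.Str.lower word0
        if token == word then max best (10 * weight)
        else if PySem.Str.isIn token word || PySem.Str.isIn word token then max best (6 * weight)
        else if levenshtein token word ≤ 2 then max best (3 * weight)
        else best) 0)
      = ((words.map PySem.Str.lower).foldl (fun best w =>
        if token == w then max best (10 * weight)
        else if PySem.Str.isIn token w || PySem.Str.isIn w token then max best (6 * weight)
        else if levenshtein token w ≤ 2 then max best (3 * weight)
        else best) 0) from by rw [List.foldl_map]]
  rw [foldA_eq token weight _ 0 le_rfl, pvTm_eq_tier]
  simp
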